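-- pv_equiv track=rewrite | github.com/maxmurtazin/Ant-RH | ant_rh_ncg_integration/core/ncg_braid_spectral.py | reduce_free_inverse
-- ===== SOURCE A (Python) =====
-- from typing import Iterable, List, Sequence, Tuple, Dict, Optional
--
-- BraidGen = Tuple[int, int]  # (i, sign), represents sigma_i^{sign}, sign in {-1,+1}
--
-- BraidWord = Tuple[BraidGen, ...]
--
-- def reduce_free_inverse(word: BraidWord) -> BraidWord:
--     """Simple cancellation sigma_i sigma_i^{-1} -> e. Does not solve full braid normal form."""
--     stack: List[BraidGen] = []
--     for g in word:
--         if stack and stack[-1][0] == g[0] and stack[-1][1] == -g[1]: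
--             stack.pop()
--         else:
--             stack.append(g)
--     return tuple(stack)
-- ===== SOURCE B (Python) =====
-- def reduce_free_inverse(word):
--     """Simple cancellation sigma_i sigma_i^{-1} -> e. Does not solve full braid normal form."""
--     w = list(word)
--     while True:
--         found = False
--         i = 0
--         while i + 1 < len(w):
--             if w[i][0] == w[i + 1][0] and w[i][1] == -w[i + 1][1]:
--                 del w[i:i + 2]
--                 found = True
--                 break
--             i += 1
--         if not found:
--             return tuple(w)
-- ===== Notes on version B (the rewrite author's own statement) =====
-- stated objective: alternative
-- what changed: Replaced the single-pass stack cancellation with a fixpoint loop that repeatedly rescans the word from the left, deletes the first adjacent inverse pair, and stops when a full scan finds none; confluence of free reduction gives the same reduced word.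
import Mathlib
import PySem

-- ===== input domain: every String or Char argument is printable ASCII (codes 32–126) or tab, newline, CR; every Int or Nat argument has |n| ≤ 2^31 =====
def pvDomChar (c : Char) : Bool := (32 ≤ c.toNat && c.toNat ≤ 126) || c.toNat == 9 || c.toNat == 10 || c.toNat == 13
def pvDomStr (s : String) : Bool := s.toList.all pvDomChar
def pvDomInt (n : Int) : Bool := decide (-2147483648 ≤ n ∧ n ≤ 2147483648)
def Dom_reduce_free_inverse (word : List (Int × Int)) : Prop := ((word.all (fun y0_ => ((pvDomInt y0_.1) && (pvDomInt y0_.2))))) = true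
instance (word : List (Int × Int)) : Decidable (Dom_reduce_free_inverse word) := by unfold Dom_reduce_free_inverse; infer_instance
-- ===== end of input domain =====

-- B replaces A's single-pass stack cancellation by a fixpoint loop that repeatedly
-- deletes the first adjacent inverse pair found by a full left-to-right rescan
-- (alternative decomposition; same reduced word by confluence of free reduction).


-- the shared cancellation test 'x[0] == y[0] and x[1] == -y[1]' (appears verbatim in both Pythons)
def pvCancels (x y : Int × Int) : Bool := x.1 = y.1 ∧ x.2 = -y.2

-- ===== PORT A =====
-- A's loop body: 'if stack and stack[-1][0] == g[0] and stack[-1][1] == -g[1]: stack.pop() else: stack.append(g)'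
def pvStepA (stack : List (Int × Int)) (g : Int × Int) : List (Int × Int) :=
  match stack.getLast? with
  | some t => if pvCancels t g then stack.dropLast else stack ++ [g]
  | none => stack ++ [g]

def reduce_free_inverse (word : List (Int × Int)) : List (Int × Int) :=
  word.foldl pvStepA []

-- ===== PORT B =====
-- B's inner while-loop: scan left to right, delete the FIRST adjacent inverse pair; none if no pair
def pvScan : List (Int × Int) → Option (List (Int × Int))
  | a :: b :: rest =>
      if pvCancels a b then some rest
      else (pvScan (b :: rest)).map (a :: ·)
  | _ => none

theorem pvScan_length : ∀ {w w' : List (Int × Int)}, pvScan w = some w' → w'.length + 2 = w.length := by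
  intro w
  induction w with
  | nil => intro w' h; simp [pvScan] at h
  | cons a t ih =>
      intro w' h
      match t with
      | [] => simp [pvScan] at h
      | b :: rest =>
          simp only [pvScan] at h
          split at h
          · cases h; simp
          · rcases Option.map_eq_some_iff.mp h with ⟨v, hv, rfl⟩
            have := ih hv
            simpa using this

-- B's outer while-loop: repeat until a full scan finds no cancellable pair
def reduce_free_inverse_alt (word : List (Int × Int)) : List (Int × Int) :=
  match _h : pvScan word with
  | some w' => reduce_free_inverse_alt w'
  | none => word
termination_by word.length
decreasing_by
  have := pvScan_length _h
  omega

-- ===== PRECONDITION & SPEC =====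
def Spec_reduce_free_inverse (word : List (Int × Int)) (out : List (Int × Int)) : Prop := out = reduce_free_inverse_alt word
instance (word : List (Int × Int)) (out : List (Int × Int)) : Decidable (Spec_reduce_free_inverse word out) := by unfold Spec_reduce_free_inverse; infer_instance

-- ===== CLAIM (what is proved, stated in full; the proofs are below) =====
def Claim_equal_reduce_free_inverse : Prop := ∀ (word : List (Int × Int)), Dom_reduce_free_inverse word → Spec_reduce_free_inverse word (reduce_free_inverse word)

-- ===== LEMMAS AND PROOFS =====

-- 'reduced' stacks/words: no two adjacent letters cancel
def pvRed (w : List (Int × Int)) : Prop := List.IsChain (fun a b => pvCancels a b = false) w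

theorem pvStepA_pop {s : List (Int × Int)} {t g : Int × Int}
    (hl : s.getLast? = some t) (hc : pvCancels t g = true) :
    pvStepA s g = s.dropLast := by
  unfold pvStepA; rw [hl]; simp [hc]

theorem pvStepA_push {s : List (Int × Int)} (g : Int × Int)
    (h : ∀ t, s.getLast? = some t → pvCancels t g = false) :
    pvStepA s g = s ++ [g] := by
  unfold pvStepA
  match hl : s.getLast? with
  | none => rfl
  | some t => simp [h t hl]

theorem pvStepA_red {s : List (Int × Int)} (g : Int × Int) (hs : pvRed s) :
    pvRed (pvStepA s g) := by
  unfold pvStepA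
  match hl : s.getLast? with
  | none =>
      have : s = [] := List.getLast?_eq_none_iff.mp hl
      subst this
      exact List.isChain_singleton _
  | some t =>
      by_cases hc : pvCancels t g
      · simp only [hc, if_true]
        exact hs.dropLast
      · simp only [hc, Bool.false_eq_true, if_false]
        refine List.isChain_append.mpr ⟨hs, List.isChain_singleton _, ?_⟩
        intro x hx y hy
        simp only [List.head?_cons, Option.mem_def, Option.some.injEq] at hy
        rw [hl] at hx
        cases hx
        subst hy
        simpa using hc

theorem pvRed_foldl {s : List (Int × Int)} (xs : List (Int × Int)) (hs : pvRed s) :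
    pvRed (List.foldl pvStepA s xs) := by
  induction xs generalizing s with
  | nil => exact hs
  | cons a t ih => exact ih (pvStepA_red a hs)

-- key confluence step: on a reduced stack, a cancellable pair is a no-op
theorem pvStepA_cancel {s : List (Int × Int)} {a b : Int × Int}
    (hs : pvRed s) (hab : pvCancels a b = true) :
    pvStepA (pvStepA s a) b = s := by
  have hab' : a.1 = b.1 ∧ a.2 = -b.2 := by simpa [pvCancels] using hab
  match hl : s.getLast? with
  | none =>
      have : s = [] := List.getLast?_eq_none_iff.mp hl
      subst this
      rw [pvStepA_push a (by simp), List.nil_append,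
        pvStepA_pop (t := a) (by simp) hab]
      simp
  | some t =>
      by_cases hc : pvCancels t a
      · -- pop t; then b = t is pushed back (s reduced: it cannot cancel again)
        have hc' : t.1 = a.1 ∧ t.2 = -a.2 := by simpa [pvCancels] using hc
        have hbt : b = t := Prod.ext (by omega) (by omega)
        have hst : s = s.dropLast ++ [t] := by
          conv_lhs => rw [← List.dropLast_append_getLast? t hl]
        rw [pvStepA_pop hl hc, pvStepA_push b ?_, hbt, ← hst]
        intro u hu
        -- u and t are adjacent in the reduced s, so u does not cancel t = b
        have hred : pvRed (s.dropLast ++ [t]) := hst ▸ hs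
        have huc : pvCancels u t = false := by
          rcases List.isChain_append.mp hred with ⟨-, -, h3⟩
          exact h3 u hu t rfl
        exact hbt ▸ huc
      · have hc2 : pvCancels t a = false := by simpa using hc
        rw [pvStepA_push a (fun u hu => by rw [hl] at hu; cases hu; exact hc2),
          pvStepA_pop (t := a) List.getLast?_concat hab, List.dropLast_concat]

-- deleting a cancellable adjacent pair does not change A's fold (from a reduced stack)
theorem foldl_delete_pair {s : List (Int × Int)} (xs ys : List (Int × Int)) {a b : Int × Int}
    (hs : pvRed s) (hab : pvCancels a b = true) :
    List.foldl pvStepA s (xs ++ a :: b :: ys) = List.foldl pvStepA s (xs ++ ys) := by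
  rw [List.foldl_append, List.foldl_append]
  have hs' : pvRed (List.foldl pvStepA s xs) := pvRed_foldl xs hs
  simp only [List.foldl_cons]
  rw [pvStepA_cancel hs' hab]

-- folding a word whose concatenation with the stack is reduced just appends it
theorem foldl_of_red : ∀ (w s : List (Int × Int)), pvRed (s ++ w) →
    List.foldl pvStepA s w = s ++ w := by
  intro w
  induction w with
  | nil => intro s _; simp
  | cons g rest ih =>
      intro s hred
      have hstep : pvStepA s g = s ++ [g] := by
        refine pvStepA_push g (fun t hl => ?_)
        have hst : s = s.dropLast ++ [t] := by
          conv_lhs => rw [← List.dropLast_append_getLast? t hl]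
        have hred2 : pvRed (s.dropLast ++ [t] ++ g :: rest) := hst ▸ hred
        rw [List.append_assoc] at hred2
        rcases List.isChain_append.mp hred2 with ⟨-, h2, -⟩
        rw [List.singleton_append] at h2
        exact (List.isChain_cons_cons.mp h2).1
      rw [List.foldl_cons, hstep, ih (s ++ [g]) (by simpa using hred)]
      simp

-- a word on which the scan finds nothing is reduced
theorem pvScan_none_red : ∀ {w : List (Int × Int)}, pvScan w = none → pvRed w := by
  intro w
  induction w with
  | nil => exact fun _ => List.isChain_nil
  | cons a t ih =>
      intro h
      match t with
      | [] => exact List.isChain_singleton _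
      | b :: rest =>
          simp only [pvScan] at h
          split at h
          · exact absurd h (by simp)
          · rename_i hc
            have hrest : pvScan (b :: rest) = none := by
              cases hv : pvScan (b :: rest) with
              | none => rfl
              | some v => rw [hv] at h; simp at h
            exact List.isChain_cons_cons.mpr ⟨by simpa using hc, ih hrest⟩

-- the scan's success decomposes the word around its first cancellable pair
theorem pvScan_some_decomp : ∀ {w w' : List (Int × Int)}, pvScan w = some w' →
    ∃ xs a b ys, w = xs ++ a :: b :: ys ∧ pvCancels a b = true ∧ w' = xs ++ ys := by
  intro w
  induction w with
  | nil => intro w' h; simp [pvScan] at h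
  | cons a t ih =>
      intro w' h
      match t with
      | [] => simp [pvScan] at h
      | b :: rest =>
          simp only [pvScan] at h
          split at h
          · rename_i hc
            cases h
            exact ⟨[], a, b, w', rfl, hc, by simp⟩
          · rcases Option.map_eq_some_iff.mp h with ⟨v, hv, rfl⟩
            rcases ih hv with ⟨xs, p, q, ys, he, hpq, hv'⟩
            exact ⟨a :: xs, p, q, ys, by simp [he], hpq, by simp [hv']⟩

theorem main_eq : ∀ (word : List (Int × Int)),
    reduce_free_inverse word = reduce_free_inverse_alt word := by
  intro word
  induction word using reduce_free_inverse_alt.induct with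
  | case1 w w' hscan ih =>
      rcases pvScan_some_decomp hscan with ⟨xs, a, b, ys, he, hab, hw'⟩
      have h1 : reduce_free_inverse w = reduce_free_inverse w' := by
        unfold reduce_free_inverse
        rw [he, hw']
        exact foldl_delete_pair xs ys List.isChain_nil hab
      rw [h1, ih]
      conv_rhs => rw [reduce_free_inverse_alt]
      rw [hscan]
  | case2 w hscan =>
      have hred : pvRed w := pvScan_none_red hscan
      have h0 : reduce_free_inverse w = w := by
        unfold reduce_free_inverse
        simpa using foldl_of_red w [] (by simpa using hred)
      rw [h0]
      conv_rhs => rw [reduce_free_inverse_alt]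
      rw [hscan]

-- ===== VERDICT (by name: the statement is the Claim_ definition above) =====
theorem reduce_free_inverse_spec : Claim_equal_reduce_free_inverse := by
  intro word _
  unfold Spec_reduce_free_inverse
  exact main_eq word
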